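-- pv_equiv track=rewrite | github.com/maxym1995/Basic | egzamin probny.py | name_sorter
-- ===== SOURCE A (Python) =====
-- def name_sorter(names):
--     male = []
--     female = []
--     slownik = {}
--     for n in names:
--         if n.endswith("a"):
--             female.append(n)
--         else:
--             male.append(n)
--     male.sort()
--     female.sort()
--     slownik['male'] = male
--     slownik['female'] = female
--     return slownik
-- ===== SOURCE B (Python) =====
-- def name_sorter(names):
--     # One pass, no sort() call: each name is merged in place into its group's
--     # list at its sorted position, found by binary search (binary insertion sort).
--     male = []
--     female = []
--     for n in names:
--         lst = female if n.endswith("a") else male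
--         lo, hi = 0, len(lst)
--         while lo < hi:
--             mid = (lo + hi) // 2
--             if lst[mid] <= n:
--                 lo = mid + 1
--             else:
--                 hi = mid
--         lst.insert(lo, n)
--     return {'male': male, 'female': female}
-- ===== Notes on version B (the rewrite author's own statement) =====
-- stated objective: alternative
-- what changed: B never calls sort: a single pass merges each name in place into its group's list at its sorted position found by a hand-written binary search (binary insertion sort), instead of A's collect-both-groups-then-sort-each shape.
import Mathlib
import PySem

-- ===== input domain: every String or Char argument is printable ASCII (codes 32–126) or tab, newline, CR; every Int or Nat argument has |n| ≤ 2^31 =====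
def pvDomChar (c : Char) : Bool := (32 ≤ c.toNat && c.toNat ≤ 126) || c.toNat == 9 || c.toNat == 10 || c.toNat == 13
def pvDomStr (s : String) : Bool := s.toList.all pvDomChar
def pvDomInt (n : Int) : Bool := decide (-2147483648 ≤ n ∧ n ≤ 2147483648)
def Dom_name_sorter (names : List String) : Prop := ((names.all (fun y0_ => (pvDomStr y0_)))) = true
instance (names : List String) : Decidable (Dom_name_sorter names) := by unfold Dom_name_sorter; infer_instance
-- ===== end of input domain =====

-- B replaces A's collect-then-sort-each-group by a single pass that merges each name
-- into its group's list at its binary-searched sorted position (binary insertion sort).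

-- ===== PORT A =====
def name_sorter (names : List String) : List (String × List String) :=
  let mf := names.foldl
    (fun (acc : List String × List String) n =>
      if PySem.Str.endswith n "a" then (acc.1, acc.2 ++ [n]) else (acc.1 ++ [n], acc.2))
    ([], [])
  let male := PySem.List.sorted mf.1 (fun x => x) false
  let female := PySem.List.sorted mf.2 (fun x => x) false
  (((PySem.Dict.empty.insert "male" male).insert "female" female) : PySem.Dict String (List String)).items

-- ===== PORT B =====
-- Source B's while loop: binary search for the insertion position (lo, hi cursors)
def bisLoop (lst : List String) (x : String) (lo hi : Nat) : Nat :=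
  if _h : lo < hi then
    let mid := (lo + hi) / 2
    if lst.getD mid "" ≤ x then bisLoop lst x (mid + 1) hi   -- lst[mid] is always in range here
    else bisLoop lst x lo mid
  else lo
termination_by hi - lo
decreasing_by all_goals omega

def name_sorter_alt (names : List String) : List (String × List String) :=
  let mf := names.foldl
    (fun (acc : List String × List String) n =>
      if PySem.Str.endswith n "a" then
        (acc.1, PySem.List.insert acc.2 (bisLoop acc.2 n 0 acc.2.length : Int) n)
      else
        (PySem.List.insert acc.1 (bisLoop acc.1 n 0 acc.1.length : Int) n, acc.2))
    ([], [])
  [("male", mf.1), ("female", mf.2)]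

-- ===== PRECONDITION & SPEC =====
def Spec_name_sorter (names : List String) (out : List (String × List String)) : Prop := out = name_sorter_alt names
instance (names : List String) (out : List (String × List String)) : Decidable (Spec_name_sorter names out) := by unfold Spec_name_sorter; infer_instance

-- ===== CLAIM (what is proved, stated in full; the proofs are below) =====
def Claim_equal_name_sorter : Prop := ∀ (names : List String), Dom_name_sorter names → Spec_name_sorter names (name_sorter names)

-- ===== LEMMAS AND PROOFS =====

-- A's partition loop computes the two filters of the input list.
theorem a_loop_eq (p : String → Bool) (l : List String) (acc : List String × List String) :
    l.foldl (fun (acc : List String × List String) n =>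
      if p n then (acc.1, acc.2 ++ [n]) else (acc.1 ++ [n], acc.2)) acc
    = (acc.1 ++ l.filter (fun n => !p n), acc.2 ++ l.filter p) := by
  induction l generalizing acc with
  | nil => simp
  | cons x xs ih => by_cases h : p x = true <;> simp [List.foldl_cons, h, ih]

-- proof-side view of B's insertion: linear position scan and structural sorted insertion
def insPos : List String → String → Nat
  | [], _ => 0
  | y :: ys, x => if y ≤ x then insPos ys x + 1 else 0

def insertSorted : List String → String → List String
  | [], x => [x]
  | y :: ys, x => if x < y then x :: y :: ys else y :: insertSorted ys x

theorem insPos_le_length (l : List String) (x : String) : insPos l x ≤ l.length := by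
  induction l with
  | nil => simp [insPos]
  | cons y ys ih => simp only [insPos, List.length_cons]; split <;> omega

-- positions strictly below insPos hold elements ≤ x
theorem le_of_lt_insPos (l : List String) (x : String) (j : Nat)
    (hj : j < insPos l x) : l.getD j "" ≤ x := by
  induction l generalizing j with
  | nil => simp [insPos] at hj
  | cons y ys ih =>
    simp only [insPos] at hj
    split at hj
    · cases j with
      | zero => simpa using ‹y ≤ x›
      | succ k => simpa using ih k (by omega)
    · omega

-- on a sorted list, positions at or above insPos hold elements > x
theorem lt_of_insPos_le (l : List String) (x : String) (hs : l.Pairwise (· ≤ ·)) (j : Nat)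
    (hj : insPos l x ≤ j) (hlen : j < l.length) : x < l.getD j "" := by
  induction l generalizing j with
  | nil => simp at hlen
  | cons y ys ih =>
    rcases List.pairwise_cons.1 hs with ⟨hy, hys⟩
    simp only [insPos] at hj
    split at hj
    · cases j with
      | zero => omega
      | succ k => simpa using ih hys k (by omega) (by simpa using hlen)
    · rename_i hnle
      have hxy : x < y := lt_of_not_ge (fun h => hnle h)
      cases j with
      | zero => simpa using hxy
      | succ k =>
        have hklen : k < ys.length := by simpa using hlen
        have hk : ys.getD k "" ∈ ys := by
          rw [List.getD_eq_getElem ys "" hklen]; exact List.getElem_mem hklen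
        simpa using lt_of_lt_of_le hxy (hy _ hk)

-- the binary search loop lands exactly on insPos (sorted list, bracketing invariant)
theorem bisLoop_eq_insPos (l : List String) (x : String) (hs : l.Pairwise (· ≤ ·)) :
    ∀ lo hi, lo ≤ insPos l x → insPos l x ≤ hi → hi ≤ l.length →
      bisLoop l x lo hi = insPos l x := by
  intro lo hi
  induction lo, hi using bisLoop.induct l x with
  | case1 lo hi h mid hle ih =>
    intro h1 h2 h3
    rw [bisLoop]
    simp only [h, dite_true]
    rw [if_pos hle]
    -- l[mid] ≤ x forces mid < insPos (else the sorted tail would exceed x)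
    have hmid : mid < insPos l x := by
      by_contra hc
      exact absurd hle (not_le.2 (lt_of_insPos_le l x hs mid (by omega) (by omega)))
    exact ih hmid h2 h3
  | case2 lo hi h mid hgt ih =>
    intro h1 h2 h3
    rw [bisLoop]
    simp only [h, dite_true]
    rw [if_neg hgt]
    -- ¬(l[mid] ≤ x) forces insPos ≤ mid
    have hmid : insPos l x ≤ mid := by
      by_contra hc
      exact hgt (le_of_lt_insPos l x mid (by omega))
    exact ih h1 hmid (by omega)
  | case3 lo hi h =>
    intro h1 h2 _
    rw [bisLoop]
    simp only [h, dite_false]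
    omega

theorem pyinsert_eq_insertSorted (l : List String) (x : String) :
    PySem.List.insert l (insPos l x : Int) x = insertSorted l x := by
  rw [PySem.List.insert_natCast l (insPos l x) x (insPos_le_length l x)]
  induction l with
  | nil => simp [insPos, insertSorted]
  | cons y ys ih =>
    simp only [insPos, insertSorted]
    by_cases h : y ≤ x
    · simp [h, not_lt.2 h, List.take_succ_cons, List.drop_succ_cons, ih]
    · simp [h, lt_of_not_ge h]

-- B's per-name step on a sorted accumulator is the structural sorted insertion
theorem binInsert_eq_insertSorted (l : List String) (x : String) (hs : l.Pairwise (· ≤ ·)) :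
    PySem.List.insert l (bisLoop l x 0 l.length : Int) x = insertSorted l x := by
  rw [bisLoop_eq_insPos l x hs 0 l.length (Nat.zero_le _) (insPos_le_length l x) le_rfl]
  exact pyinsert_eq_insertSorted l x

theorem insertSorted_perm (l : List String) (x : String) :
    (insertSorted l x).Perm (x :: l) := by
  induction l with
  | nil => simp [insertSorted]
  | cons y ys ih =>
    simp only [insertSorted]
    split
    · exact List.Perm.refl _
    · exact (ih.cons y).trans (List.Perm.swap x y ys)

theorem insertSorted_pairwise (l : List String) (x : String)
    (h : l.Pairwise (· ≤ ·)) : (insertSorted l x).Pairwise (· ≤ ·) := by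
  induction l with
  | nil => simp [insertSorted]
  | cons y ys ih =>
    simp only [insertSorted]
    rcases List.pairwise_cons.1 h with ⟨hy, hys⟩
    split
    · rename_i hlt
      refine List.pairwise_cons.2 ⟨?_, h⟩
      intro b hb
      rcases List.mem_cons.1 hb with rfl | hb
      · exact le_of_lt hlt
      · exact le_trans (le_of_lt hlt) (hy _ hb)
    · rename_i hnlt
      refine List.pairwise_cons.2 ⟨?_, ih hys⟩
      intro b hb
      rcases List.mem_cons.1 (((insertSorted_perm ys x).mem_iff).1 hb) with rfl | hb
      · exact le_of_not_gt hnlt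
      · exact hy _ hb

-- B's interleaved loop splits into one binary-insertion fold per filter.
theorem b_loop_eq (p : String → Bool) (l : List String) (acc : List String × List String) :
    l.foldl (fun (acc : List String × List String) n =>
      if p n then (acc.1, PySem.List.insert acc.2 (bisLoop acc.2 n 0 acc.2.length : Int) n)
      else (PySem.List.insert acc.1 (bisLoop acc.1 n 0 acc.1.length : Int) n, acc.2)) acc
    = ((l.filter (fun n => !p n)).foldl
         (fun acc n => PySem.List.insert acc (bisLoop acc n 0 acc.length : Int) n) acc.1,
       (l.filter p).foldl
         (fun acc n => PySem.List.insert acc (bisLoop acc n 0 acc.length : Int) n) acc.2) := by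
  induction l generalizing acc with
  | nil => simp
  | cons x xs ih => by_cases h : p x = true <;> simp [List.foldl_cons, h, ih]

-- with a sorted accumulator, the binary-insertion fold is the structural-insertion fold
theorem foldl_binInsert_eq (l : List String) (acc : List String)
    (hs : acc.Pairwise (· ≤ ·)) :
    l.foldl (fun acc n => PySem.List.insert acc (bisLoop acc n 0 acc.length : Int) n) acc
      = l.foldl insertSorted acc := by
  induction l generalizing acc with
  | nil => rfl
  | cons x xs ih =>
    simp only [List.foldl_cons, binInsert_eq_insertSorted acc x hs]
    exact ih _ (insertSorted_pairwise acc x hs)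

theorem foldl_insertSorted_perm (l acc : List String) :
    (l.foldl insertSorted acc).Perm (acc ++ l) := by
  induction l generalizing acc with
  | nil => simp
  | cons x xs ih =>
    simp only [List.foldl_cons]
    refine (ih (insertSorted acc x)).trans ?_
    have h1 : (insertSorted acc x ++ xs).Perm ((x :: acc) ++ xs) :=
      (insertSorted_perm acc x).append_right xs
    refine h1.trans ?_
    simpa using (List.perm_middle (a := x) (l₁ := acc) (l₂ := xs)).symm

theorem foldl_insertSorted_pairwise (l acc : List String)
    (h : acc.Pairwise (· ≤ ·)) : (l.foldl insertSorted acc).Pairwise (· ≤ ·) := by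
  induction l generalizing acc with
  | nil => simpa using h
  | cons x xs ih => exact ih _ (insertSorted_pairwise acc x h)

-- insertion fold from [] = Python's sorted (identity key)
theorem foldl_insertSorted_eq_sorted (l : List String) :
    PySem.List.sorted l (fun x => x) false = l.foldl insertSorted [] := by
  apply PySem.List.sorted_id_eq_of_perm_of_pairwise
  · simpa using foldl_insertSorted_perm l []
  · exact foldl_insertSorted_pairwise l [] (by simp)

-- ===== VERDICT (by name: the statement is the Claim_ definition above) =====
theorem name_sorter_spec : Claim_equal_name_sorter := by
  intro names _
  unfold Spec_name_sorter name_sorter name_sorter_alt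
  rw [a_loop_eq, b_loop_eq]
  simp only [foldl_binInsert_eq _ [] (by simp)]
  simp [PySem.Dict.insert, PySem.Dict.empty, foldl_insertSorted_eq_sorted]
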